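-- pv_equiv track=rewrite | github.com/sot/skare3_tools | skare3_tools/scripts/convert_numpydoc.py | returns_to_numpydoc
-- ===== SOURCE A (Python) =====
-- REST_MARKERS_RETURNS = [":returns:", ":return:", ":rtype:"]
--
-- def get_marker_idxs(lines: list[str], markers_rest: list[str]):
--     """
--     Get the indices of all lines that start with a given marker.
--
--     Parameters
--     ----------
--     lines : list
--         A list of strings representing the lines of text to search.
--     markers : list
--         A list of strings representing the markers to search for.
--
--     Returns
--     -------
--     idxs : list
--         A list of integers representing the indices of all lines that start with
--         one of the given markers. If no such lines are found, returns an empty list.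
--     markers : list
--         A list of strings representing the markers that were found.
--     """
--     idxs = []
--     markers = []
--     for idx, line in enumerate(lines):
--         for marker in markers_rest:
--             if line.startswith(marker):
--                 idxs.append(idx)
--                 markers.append(marker)
--                 break
--     idxs.append(len(lines))
--     return idxs, markers
--
-- def returns_to_numpydoc(lines: list) -> list:
--     """
--     Convert lines of reST returns section to numpydoc format.
--
--     Parameters
--     ----------
--     lines : list
--         List of lines of reST returns.
--
--     Returns
--     -------
--     list
--         List of lines of numpydoc returns.
--     """
--     if not lines:
--         return []
--
--     idxs, markers = get_marker_idxs(lines, REST_MARKERS_RETURNS)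
--
--     return_type = None
--     return_desc_lines = []
--
--     for idx0, idx1, marker in zip(idxs[:-1], idxs[1:], markers):
--         if marker == ":rtype:":
--             return_type = " ".join(lines[idx0:idx1])
--             return_type = return_type[len(marker) :].strip()
--
--         elif marker in [":return:", ":returns:"]:
--             return_desc_lines = [lines[idx0][len(marker) :]] + lines[idx0 + 1 : idx1]
--
--     lines_out = [
--         "Returns",
--         "-------",
--     ]
--
--     if return_type is None:
--         # No explicit return type.
--         if len(return_desc_lines) == 1:
--             # Single line return description, so assume it is the return type.
--             return_type = return_desc_lines[0].strip()
--             return_desc_lines = []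
--         else:
--             # Multiline return description, so use "out" as the thing being returned.
--             return_type = "out"
--
--     lines_out.append(return_type)
--     for line in return_desc_lines:
--         lines_out.append("    " + line.strip())  # noqa: PERF401
--
--     return lines_out
-- ===== SOURCE B (Python) =====
-- def returns_to_numpydoc(lines: list) -> list:
--     """Single linear pass with current-marker state and a buffer (no index lists)."""
--     if not lines:
--         return []
--
--     markers = (":returns:", ":return:", ":rtype:")
--     return_type = None
--     return_desc_lines = []
--     cur = None
--     buf = []
--
--     def flush():
--         nonlocal return_type, return_desc_lines
--         if cur == ":rtype:":
--             return_type = " ".join(buf)[len(cur):].strip()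
--         elif cur is not None:
--             return_desc_lines = [buf[0][len(cur):]] + buf[1:]
--
--     for line in lines:
--         m = next((mk for mk in markers if line.startswith(mk)), None)
--         if m is not None:
--             flush()
--             cur = m
--             buf = [line]
--         elif cur is not None:
--             buf.append(line)
--
--     flush()
--
--     out = ["Returns", "-------"]
--     if return_type is None:
--         if len(return_desc_lines) == 1:
--             return_type = return_desc_lines[0].strip()
--             return_desc_lines = []
--         else:
--             return_type = "out"
--     out.append(return_type)
--     for line in return_desc_lines:
--         out.append("    " + line.strip())
--     return out
-- ===== Notes on version B (the rewrite author's own statement) =====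
-- stated objective: simpler
-- what changed: Replaced the marker-index list + zip of index pairs + repeated slicing (get_marker_idxs) by a single linear pass that keeps a current-marker state and a buffer and flushes each segment into return_type/return_desc_lines.
import Mathlib
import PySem

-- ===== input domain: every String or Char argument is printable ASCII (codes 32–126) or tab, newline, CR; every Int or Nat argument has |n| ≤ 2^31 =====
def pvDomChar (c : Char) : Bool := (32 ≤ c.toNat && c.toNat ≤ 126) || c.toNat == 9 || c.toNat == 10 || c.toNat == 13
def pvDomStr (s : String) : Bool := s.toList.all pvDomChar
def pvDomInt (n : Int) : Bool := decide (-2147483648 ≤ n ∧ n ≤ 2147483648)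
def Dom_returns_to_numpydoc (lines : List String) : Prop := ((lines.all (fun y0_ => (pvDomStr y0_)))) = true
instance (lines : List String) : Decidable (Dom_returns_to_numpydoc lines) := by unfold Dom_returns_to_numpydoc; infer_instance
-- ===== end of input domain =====

-- B replaces A's marker-index lists + zip + slicing by one linear pass with a
-- current-marker state and a buffer (objective: simpler decomposition, same cost).

-- ===== PORT A =====
def REST_MARKERS_RETURNS : List String := [":returns:", ":return:", ":rtype:"]

-- body of get_marker_idxs's loop; the inner 'for marker …: if startswith: …; break'
-- takes the first matching marker
def pvGStep (markers_rest : List String) (acc : List Int × List String) (p : Int × String) :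
    List Int × List String :=
  match markers_rest.find? (fun marker => PySem.Str.startswith p.2 marker) with
  | some marker => (acc.1 ++ [p.1], acc.2 ++ [marker])
  | none => acc

def get_marker_idxs (lines : List String) (markers_rest : List String) : List Int × List String :=
  let st := (PySem.List.enumerate lines).foldl (pvGStep markers_rest) ([], [])
  (st.1 ++ [(lines.length : Int)], st.2)

-- body of A's 'for idx0, idx1, marker in zip(…)' loop
def pvStepA (lines : List String) (acc : Option String × List String) (t : (Int × Int) × String) :
    Option String × List String :=
  if t.2 = ":rtype:" then
    (some (PySem.Str.strip (PySem.Str.slice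
        (PySem.Str.join " " (PySem.List.slice lines (some t.1.1) (some t.1.2)))
        (some (PySem.Str.len t.2)) none)), acc.2)
  else if t.2 = ":return:" ∨ t.2 = ":returns:" then
    -- lines[idx0]: idx0 is always a valid marker index, so pyGet? is some there
    (acc.1, [PySem.Str.slice ((PySem.List.pyGet? lines t.1.1).getD "") (some (PySem.Str.len t.2)) none]
              ++ PySem.List.slice lines (some (t.1.1 + 1)) (some t.1.2))
  else acc

def returns_to_numpydoc (lines : List String) : List String :=
  if lines.isEmpty then []
  else
    let gm := get_marker_idxs lines REST_MARKERS_RETURNS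
    let st := (((PySem.List.slice gm.1 none (some (-1))).zip (PySem.List.slice gm.1 (some 1) none)).zip
        gm.2).foldl (pvStepA lines) (none, [])
    let rd : String × List String :=
      match st.1 with
      | none =>
        if st.2.length = 1 then (PySem.Str.strip (st.2.headD ""), []) -- return_desc_lines[0] of a length-1 list
        else ("out", st.2)
      | some rt => (rt, st.2)
    ["Returns", "-------", rd.1] ++ rd.2.map (fun line => "    " ++ PySem.Str.strip line)

-- ===== PORT B =====
def pvFindMarker (line : String) : Option String :=
  [":returns:", ":return:", ":rtype:"].find? (fun m => PySem.Str.startswith line m)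

-- Source B's flush(): fold the open segment's buffer into (return_type, return_desc_lines)
def pvFlush (rt : Option String) (desc : List String) (cur : Option String) (buf : List String) :
    Option String × List String :=
  match cur with
  | none => (rt, desc)
  | some m =>
    if m = ":rtype:" then
      (some (PySem.Str.strip (PySem.Str.slice (PySem.Str.join " " buf)
          (some (PySem.Str.len m)) none)), desc)
    else
      -- buf[0] exists whenever cur is set; headD "" is that first line
      (rt, [PySem.Str.slice (buf.headD "") (some (PySem.Str.len m)) none] ++ buf.tail)

-- Source B's loop body; state = (return_type, return_desc_lines, cur, buf)
def pvStepB (s : Option String × List String × Option String × List String) (line : String) :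
    Option String × List String × Option String × List String :=
  match pvFindMarker line with
  | some m =>
    let f := pvFlush s.1 s.2.1 s.2.2.1 s.2.2.2
    (f.1, f.2, some m, [line])
  | none =>
    if s.2.2.1.isSome then (s.1, s.2.1, s.2.2.1, s.2.2.2 ++ [line]) else s

def returns_to_numpydoc_alt (lines : List String) : List String :=
  if lines.isEmpty then []
  else
    let s := lines.foldl pvStepB (none, [], none, [])
    let f := pvFlush s.1 s.2.1 s.2.2.1 s.2.2.2
    let rd : String × List String :=
      match f.1 with
      | none =>
        if f.2.length = 1 then (PySem.Str.strip (f.2.headD ""), [])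
        else ("out", f.2)
      | some rt => (rt, f.2)
    ["Returns", "-------", rd.1] ++ rd.2.map (fun line => "    " ++ PySem.Str.strip line)

-- ===== PRECONDITION & SPEC =====
def Spec_returns_to_numpydoc (lines : List String) (out : List String) : Prop := out = returns_to_numpydoc_alt lines
instance (lines : List String) (out : List String) : Decidable (Spec_returns_to_numpydoc lines out) := by unfold Spec_returns_to_numpydoc; infer_instance

-- ===== CLAIM (what is proved, stated in full; the proofs are below) =====
def Claim_equal_returns_to_numpydoc : Prop := ∀ (lines : List String), Dom_returns_to_numpydoc lines → Spec_returns_to_numpydoc lines (returns_to_numpydoc lines)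

-- ===== LEMMAS AND PROOFS =====

def pvFinalize (s : Option String × List String × Option String × List String) :
    Option String × List String :=
  pvFlush s.1 s.2.1 s.2.2.1 s.2.2.2

def pvNoM (x : String) : Bool := (pvFindMarker x).isNone

-- the marker segments of the input: (marker, marker line :: its continuation lines)
def pvSegs : List String → List (String × List String)
  | [] => []
  | l :: ls =>
    match pvFindMarker l with
    | some m => (m, l :: ls.takeWhile pvNoM) :: pvSegs (ls.dropWhile pvNoM)
    | none => pvSegs ls
  termination_by xs => xs.length
  decreasing_by
    · exact Nat.lt_succ_of_le (List.length_dropWhile_le pvNoM ls)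
    · exact Nat.lt_succ_self _

def pvStepSeg (acc : Option String × List String) (p : String × List String) :
    Option String × List String :=
  pvFlush acc.1 acc.2 (some p.1) p.2

-- relative positions and markers of the marker lines
def pvMpos : List String → List (Nat × String)
  | [] => []
  | l :: ls =>
    match pvFindMarker l with
    | some m => (0, m) :: (pvMpos ls).map (fun p => (p.1 + 1, p.2))
    | none => (pvMpos ls).map (fun p => (p.1 + 1, p.2))

-- the triples A's zip produces: (idx0, next marker index or n, marker)
def pvTrips : List (Int × String) → Int → List ((Int × Int) × String)
  | [], _ => []
  | (i, m) :: rest, n =>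
    ((i, match rest with | [] => n | (j, _) :: _ => j), m) :: pvTrips rest n

theorem pvGmi_foldl (xs : List String) : ∀ (s : Int) (acc : List Int × List String),
    (PySem.List.enumerate xs s).foldl (pvGStep REST_MARKERS_RETURNS) acc
    = (acc.1 ++ (pvMpos xs).map (fun p => s + (p.1 : Int)), acc.2 ++ (pvMpos xs).map Prod.snd) := by
  induction xs with
  | nil => intro s acc; simp [PySem.List.enumerate_nil, pvMpos]
  | cons x xs ih =>
    intro s acc
    rw [PySem.List.enumerate_cons, List.foldl_cons]
    have hmap : ((pvMpos xs).map (fun p : Nat × String => (p.1 + 1, p.2))).map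
          (fun p => s + (p.1 : Int))
        = (pvMpos xs).map (fun p => (s + 1) + (p.1 : Int)) := by
      rw [List.map_map]
      refine List.map_congr_left (fun p _ => ?_)
      simp
      ring
    have hmap2 : ((pvMpos xs).map (fun p : Nat × String => (p.1 + 1, p.2))).map Prod.snd
        = (pvMpos xs).map Prod.snd := by
      rw [List.map_map]
      exact List.map_congr_left (fun p _ => by simp)
    cases h : pvFindMarker x with
    | some m =>
      have hstep : pvGStep REST_MARKERS_RETURNS acc (s, x) = (acc.1 ++ [s], acc.2 ++ [m]) := by
        show (match pvFindMarker x with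
              | some marker => (acc.1 ++ [s], acc.2 ++ [marker])
              | none => acc) = _
        rw [h]
      have hmp : pvMpos (x :: xs) = (0, m) :: (pvMpos xs).map (fun p : Nat × String => (p.1 + 1, p.2)) := by
        simp [pvMpos, h]
      rw [hstep, ih (s + 1) (acc.1 ++ [s], acc.2 ++ [m]), hmp]
      simp only [List.map_cons, hmap, hmap2, Prod.mk.injEq]
      constructor <;> simp
    | none =>
      have hstep : pvGStep REST_MARKERS_RETURNS acc (s, x) = acc := by
        show (match pvFindMarker x with
              | some marker => (acc.1 ++ [s], acc.2 ++ [marker])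
              | none => acc) = _
        rw [h]
      have hmp : pvMpos (x :: xs) = (pvMpos xs).map (fun p : Nat × String => (p.1 + 1, p.2)) := by
        simp [pvMpos, h]
      rw [hstep, ih (s + 1) acc, hmp]
      rw [hmap, hmap2]

theorem pvGmi_char (lines : List String) :
    get_marker_idxs lines REST_MARKERS_RETURNS
      = (((pvMpos lines).map (fun p => (((p.1 : Nat) : Int), p.2))).map Prod.fst ++ [(lines.length : Int)],
         ((pvMpos lines).map (fun p => (((p.1 : Nat) : Int), p.2))).map Prod.snd) := by
  unfold get_marker_idxs
  rw [pvGmi_foldl lines 0 ([], [])]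
  simp [List.map_map]

theorem pvZipAux (M : List (Int × String)) (n : Int) :
    ((M.map Prod.fst).zip ((M.map Prod.fst ++ [n]).tail)).zip (M.map Prod.snd) = pvTrips M n := by
  induction M with
  | nil => simp [pvTrips]
  | cons a M ih =>
    obtain ⟨i, m⟩ := a
    cases M with
    | nil => simp [pvTrips]
    | cons b M' =>
      obtain ⟨j, mj⟩ := b
      simp only [List.map_cons, List.cons_append, List.tail_cons] at ih ⊢
      simp only [List.zip_cons_cons]
      rw [pvTrips]
      simp only [List.cons.injEq]
      exact ⟨trivial, ih⟩

theorem pvMpos_append_noM (t d : List String) (ht : ∀ x ∈ t, pvNoM x = true) :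
    pvMpos (t ++ d) = (pvMpos d).map (fun p => (p.1 + t.length, p.2)) := by
  induction t with
  | nil => simp
  | cons x t ih =>
    have hx : pvFindMarker x = none := by
      have := ht x (by simp)
      simpa [pvNoM, Option.isNone_iff_eq_none] using this
    simp only [List.cons_append]
    have e : pvMpos (x :: (t ++ d)) = (pvMpos (t ++ d)).map (fun p : Nat × String => (p.1 + 1, p.2)) := by
      simp [pvMpos, hx]
    rw [e, ih (fun y hy => ht y (by simp [hy])), List.map_map]
    refine List.map_congr_left (fun p _ => ?_)
    simp
    omega

theorem pvMaster : ∀ (fuel : Nat) (suf pre : List String), suf.length ≤ fuel →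
    ∀ (acc : Option String × List String),
    (pvTrips ((pvMpos suf).map (fun p => (((pre.length + p.1 : Nat) : Int), p.2)))
        ((pre.length + suf.length : Nat) : Int)).foldl (pvStepA (pre ++ suf)) acc
      = (pvSegs suf).foldl pvStepSeg acc := by
  intro fuel
  induction fuel with
  | zero =>
    intro suf pre hlen acc
    have h0 : suf = [] := List.length_eq_zero_iff.mp (Nat.le_zero.mp hlen)
    subst h0
    simp [pvMpos, pvTrips, pvSegs]
  | succ k ih =>
    intro suf pre hlen acc
    cases suf with
    | nil => simp [pvMpos, pvTrips, pvSegs]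
    | cons l ls =>
      cases h : pvFindMarker l with
      | none =>
        have hmp : pvMpos (l :: ls) = (pvMpos ls).map (fun p : Nat × String => (p.1 + 1, p.2)) := by
          simp [pvMpos, h]
        have hmap : ((pvMpos ls).map (fun p : Nat × String => (p.1 + 1, p.2))).map
              (fun p => (((pre.length + p.1 : Nat) : Int), p.2))
            = (pvMpos ls).map (fun p => ((((pre ++ [l]).length + p.1 : Nat) : Int), p.2)) := by
          rw [List.map_map]
          refine List.map_congr_left (fun p _ => ?_)
          simp; omega
        have hlen2 : ((pre.length + (l :: ls).length : Nat) : Int)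
            = (((pre ++ [l]).length + ls.length : Nat) : Int) := by
          simp; omega
        have happ : pre ++ l :: ls = (pre ++ [l]) ++ ls := by simp
        have hsegs : pvSegs (l :: ls) = pvSegs ls := by rw [pvSegs, h]
        rw [hmp, hmap, hlen2, happ, hsegs]
        exact ih ls (pre ++ [l]) (by simpa using Nat.le_of_succ_le_succ hlen) acc
      | some m =>
        have htd : ls.takeWhile pvNoM ++ ls.dropWhile pvNoM = ls := List.takeWhile_append_dropWhile
        set t := ls.takeWhile pvNoM with htdef
        set d := ls.dropWhile pvNoM with hddef
        have htno : ∀ x ∈ t, pvNoM x = true := fun x hx => List.mem_takeWhile_imp hx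
        have hmls : pvMpos ls = (pvMpos d).map (fun p => (p.1 + t.length, p.2)) := by
          rw [← htd]; exact pvMpos_append_noM t d htno
        have hmp : pvMpos (l :: ls)
            = (0, m) :: (pvMpos d).map (fun p : Nat × String => (p.1 + t.length + 1, p.2)) := by
          have e : pvMpos (l :: ls) = (0, m) :: (pvMpos ls).map (fun p : Nat × String => (p.1 + 1, p.2)) := by
            simp [pvMpos, h]
          rw [e, hmls, List.map_map]
          refine congrArg (List.cons _) (List.map_congr_left (fun p _ => ?_))
          simp
        have hlsln : ls.length = t.length + d.length := by
          conv_lhs => rw [← htd]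
          simp
        have hmapd : ((pvMpos d).map (fun p : Nat × String => (p.1 + t.length + 1, p.2))).map
              (fun p => (((pre.length + p.1 : Nat) : Int), p.2))
            = (pvMpos d).map (fun p => ((((pre ++ l :: t).length + p.1 : Nat) : Int), p.2)) := by
          rw [List.map_map]
          refine List.map_congr_left (fun p _ => ?_)
          simp; omega
        -- unfold the head triple
        rw [hmp]
        simp only [List.map_cons, hmapd]
        simp only [pvTrips]
        -- second component of the head triple
        have hd2 : (match (pvMpos d).map (fun p => ((((pre ++ l :: t).length + p.1 : Nat) : Int), p.2)) with
              | [] => ((pre.length + (l :: ls).length : Nat) : Int)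
              | (j, _) :: _ => j)
            = ((pre.length + t.length + 1 : Nat) : Int) := by
          rcases hde : d with _ | ⟨l', d'⟩
          · have hmd : pvMpos ([] : List String) = [] := rfl
            rw [hmd]
            simp only [List.map_nil]
            rw [hde] at htd
            have hlt : ls.length = t.length := by rw [← htd]; simp
            simp only [List.length_cons]
            simp
            rw [hlt]
            ring
          · have hdw : List.dropWhile pvNoM ls = l' :: d' := by rw [← hddef]; exact hde
            have w : List.dropWhile pvNoM ls ≠ [] := by simp [hdw]
            have hl' : pvNoM l' = false := by
              simpa [hdw] using List.head_dropWhile_not pvNoM w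
            obtain ⟨m', hm'⟩ : ∃ m', pvFindMarker l' = some m' := by
              have hni : (pvFindMarker l').isNone = false := hl'
              cases hfm : pvFindMarker l' with
              | none => rw [hfm] at hni; simp at hni
              | some m'' => exact ⟨m'', rfl⟩
            have hmd : pvMpos (l' :: d') = (0, m') :: (pvMpos d').map (fun p : Nat × String => (p.1 + 1, p.2)) := by
              simp [pvMpos, hm']
            rw [hmd]
            simp only [List.map_cons]
            simp
            ring
        rw [hd2]
        simp only [List.foldl_cons]
        -- the head step computes the segment (m, l :: t)
        have hm3 : m ∈ [":returns:", ":return:", ":rtype:"] := List.mem_of_find?_eq_some h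
        have hlines : pre ++ l :: ls = pre ++ l :: (t ++ d) := by rw [htd]
        have hsliceA : PySem.List.slice (pre ++ l :: ls)
              (some ((pre.length : Int))) (some ((pre.length : Int) + (t.length : Int) + 1))
            = l :: t := by
          have h2 : ((pre.length : Int) + (t.length : Int) + 1)
              = (((pre.length + t.length + 1 : Nat)) : Int) := by push_cast; ring
          rw [h2, hlines, PySem.List.slice_natCast]
          have hsub : pre.length + t.length + 1 - pre.length = t.length + 1 := by omega
          rw [hsub]
          have hdrop : (pre ++ l :: (t ++ d)).drop pre.length = l :: (t ++ d) :=
            List.drop_left (l₁ := pre) (l₂ := l :: (t ++ d))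
          rw [hdrop, List.take_succ_cons, List.take_left]
        have hgetA : (PySem.List.pyGet? (pre ++ l :: ls) ((pre.length : Int))).getD "" = l := by
          rw [PySem.List.pyGet?_natCast]
          simp
        have hsliceA2 : PySem.List.slice (pre ++ l :: ls)
              (some ((pre.length : Int) + 1)) (some ((pre.length : Int) + (t.length : Int) + 1))
            = t := by
          have h1 : ((pre.length : Int) + 1) = (((pre.length + 1 : Nat)) : Int) := by push_cast; ring
          have h2 : ((pre.length : Int) + (t.length : Int) + 1)
              = (((pre.length + t.length + 1 : Nat)) : Int) := by push_cast; ring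
          rw [h1, h2, hlines, PySem.List.slice_natCast]
          have hsub : pre.length + t.length + 1 - (pre.length + 1) = t.length := by omega
          rw [hsub]
          have happ2 : pre ++ l :: (t ++ d) = (pre ++ [l]) ++ (t ++ d) := by simp
          have hdrop : (pre ++ l :: (t ++ d)).drop (pre.length + 1) = t ++ d := by
            rw [happ2]
            have hl1 : pre.length + 1 = (pre ++ [l]).length := by simp
            rw [hl1]
            exact List.drop_left
          rw [hdrop, List.take_left]
        have hstep : pvStepA (pre ++ l :: ls) acc
              ((((pre.length + 0 : Nat) : Int), ((pre.length + t.length + 1 : Nat) : Int)), m)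
            = pvStepSeg acc (m, l :: t) := by
          have hm3' : m = ":returns:" ∨ m = ":return:" ∨ m = ":rtype:" := by simpa using hm3
          rcases hm3' with rfl | rfl | rfl <;>
            simp [pvStepA, pvStepSeg, pvFlush, hsliceA, hsliceA2]
        rw [hstep]
        -- recurse on d
        have hlen3 : ((pre.length + (l :: ls).length : Nat) : Int)
            = (((pre ++ l :: t).length + d.length : Nat) : Int) := by
          simp [hlsln]; omega
        have happ3 : pre ++ l :: ls = (pre ++ l :: t) ++ d := by
          rw [← htd]; simp
        have hsegs : pvSegs (l :: ls) = (m, l :: t) :: pvSegs d := by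
          rw [pvSegs, h]
        rw [hlen3, happ3, hsegs]
        simp only [List.foldl_cons]
        have hdlen : d.length ≤ k := by
          have h1 : d.length ≤ ls.length := by rw [hddef]; exact List.length_dropWhile_le _ _
          have h2 : ls.length ≤ k := by simpa using Nat.le_of_succ_le_succ hlen
          omega
        exact ih d (pre ++ l :: t) hdlen (pvStepSeg acc (m, l :: t))

theorem pvFlushB1 (ls : List String) : ∀ (rt : Option String) (desc : List String) (m : String)
    (buf : List String),
    pvFinalize (ls.foldl pvStepB (rt, desc, some m, buf))
      = ((m, buf ++ ls.takeWhile pvNoM) :: pvSegs (ls.dropWhile pvNoM)).foldl pvStepSeg (rt, desc) := by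
  induction ls with
  | nil =>
    intro rt desc m buf
    simp [pvFinalize, pvStepSeg, pvSegs]
  | cons l ls ih =>
    intro rt desc m buf
    simp only [List.foldl_cons]
    cases h : pvFindMarker l with
    | none =>
      have hstep : pvStepB (rt, desc, some m, buf) l = (rt, desc, some m, buf ++ [l]) := by
        simp [pvStepB, h]
      have hno : pvNoM l = true := by simp [pvNoM, h]
      rw [hstep, ih rt desc m (buf ++ [l])]
      simp [hno, List.append_assoc]
    | some m' =>
      have hstep : pvStepB (rt, desc, some m, buf) l
          = ((pvFlush rt desc (some m) buf).1, (pvFlush rt desc (some m) buf).2, some m', [l]) := by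
        simp [pvStepB, h]
      have hno : pvNoM l = false := by simp [pvNoM, h]
      rw [hstep, ih (pvFlush rt desc (some m) buf).1 (pvFlush rt desc (some m) buf).2 m' [l]]
      have hsegs : pvSegs (l :: ls)
          = (m', l :: ls.takeWhile pvNoM) :: pvSegs (ls.dropWhile pvNoM) := by
        rw [pvSegs, h]
      simp [hno, hsegs, pvStepSeg]

theorem pvFlushB0 (ls : List String) : ∀ (rt : Option String) (desc : List String),
    pvFinalize (ls.foldl pvStepB (rt, desc, none, []))
      = (pvSegs ls).foldl pvStepSeg (rt, desc) := by
  induction ls with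
  | nil => intro rt desc; simp [pvFinalize, pvFlush, pvSegs]
  | cons l ls ih =>
    intro rt desc
    simp only [List.foldl_cons]
    cases h : pvFindMarker l with
    | none =>
      have hstep : pvStepB (rt, desc, none, []) l = (rt, desc, none, []) := by
        simp [pvStepB, h]
      have hsegs : pvSegs (l :: ls) = pvSegs ls := by rw [pvSegs, h]
      rw [hstep, ih rt desc, hsegs]
    | some m =>
      have hstep : pvStepB (rt, desc, none, []) l = (rt, desc, some m, [l]) := by
        simp [pvStepB, h, pvFlush]
      have hsegs : pvSegs (l :: ls)
          = (m, l :: ls.takeWhile pvNoM) :: pvSegs (ls.dropWhile pvNoM) := by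
        rw [pvSegs, h]
      rw [hstep, pvFlushB1 ls rt desc m [l], hsegs]
      simp

theorem pvCore (lines : List String) :
    (((PySem.List.slice (get_marker_idxs lines REST_MARKERS_RETURNS).1 none (some (-1))).zip
        (PySem.List.slice (get_marker_idxs lines REST_MARKERS_RETURNS).1 (some 1) none)).zip
      (get_marker_idxs lines REST_MARKERS_RETURNS).2).foldl (pvStepA lines) (none, [])
    = pvFinalize (lines.foldl pvStepB (none, [], none, [])) := by
  rw [pvGmi_char]
  simp only
  rw [PySem.List.slice_to_neg_one, PySem.List.slice_from_one, List.dropLast_concat]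
  rw [pvZipAux]
  have hM : (pvMpos lines).map (fun p => (((p.1 : Nat) : Int), p.2))
      = (pvMpos lines).map (fun p => (((([] : List String).length + p.1 : Nat) : Int), p.2)) := by
    refine List.map_congr_left (fun p _ => ?_)
    simp
  have hn : ((lines.length : Nat) : Int) = ((([] : List String).length + lines.length : Nat) : Int) := by
    simp
  have hL : pvStepA lines = pvStepA (([] : List String) ++ lines) := by simp
  rw [hM, hn, hL, pvMaster lines.length lines [] le_rfl (none, [])]
  rw [pvFlushB0 lines none []]

-- ===== VERDICT (by name: the statement is the Claim_ definition above) =====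
theorem returns_to_numpydoc_spec : Claim_equal_returns_to_numpydoc := by
  intro lines _
  unfold Spec_returns_to_numpydoc returns_to_numpydoc returns_to_numpydoc_alt
  by_cases hE : lines.isEmpty
  · simp [hE]
  · simp only [hE, Bool.false_eq_true, if_false]
    rw [pvCore lines]
    rfl
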